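-- pv_equiv track=rewrite | github.com/CottageLabs/finance | service/lib/sync.py | get_primary_bank_acc
-- ===== SOURCE A (Python) =====
-- def get_primary_bank_acc(bank_accounts):
--     account = None
--     for acc in bank_accounts:
--         if acc['is_primary']:
--             account = acc
--     if not account:
--         raise ValueError('No bank account is marked as primary in '
--                          'FreeAgent API. Please double-check and fix.')
--     return account
-- ===== SOURCE B (Python) =====
-- def get_primary_bank_acc(bank_accounts):
--     for acc in reversed(list(bank_accounts)):
--         if acc['is_primary']:
--             return acc
--     raise ValueError('No bank account is marked as primary in '
--                      'FreeAgent API. Please double-check and fix.')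
-- ===== Notes on version B (the rewrite author's own statement) =====
-- stated objective: simpler
-- what changed: B scans the accounts in reverse and returns the first primary one immediately, instead of A's full forward pass that keeps overwriting an accumulator; the ValueError is raised only if the whole reverse scan finds none.
import Mathlib
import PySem

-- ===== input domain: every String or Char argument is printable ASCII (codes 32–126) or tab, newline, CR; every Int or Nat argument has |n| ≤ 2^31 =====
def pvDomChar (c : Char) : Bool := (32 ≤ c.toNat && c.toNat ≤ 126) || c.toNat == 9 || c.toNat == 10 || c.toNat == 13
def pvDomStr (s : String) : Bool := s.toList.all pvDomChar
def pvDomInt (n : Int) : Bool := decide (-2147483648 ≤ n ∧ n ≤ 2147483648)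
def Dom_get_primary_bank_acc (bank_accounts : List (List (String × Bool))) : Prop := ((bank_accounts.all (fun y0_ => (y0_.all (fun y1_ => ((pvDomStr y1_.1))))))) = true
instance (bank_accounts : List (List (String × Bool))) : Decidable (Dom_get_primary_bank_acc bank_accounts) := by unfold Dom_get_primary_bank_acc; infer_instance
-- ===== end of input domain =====

-- B scans the accounts in reverse and returns the first primary one immediately (simpler than A's
-- accumulator-overwriting full forward pass); same ValueError when none is primary.

-- ===== PORT A =====
-- `if not account: raise` / `return account` at the end of A's loop (empty dict is falsy too)
def pvBaseA (account : Option (List (String × Bool))) : List (String × Bool) :=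
  match account with
  | none => []                         -- ValueError (excluded by Pre_)
  | some a => if a = [] then [] else a -- empty dict is falsy: ValueError (excluded by Pre_)

-- A's forward loop with the `account` accumulator; dict lookup = first match, KeyError → [] (excluded by Pre_)
def pvLoopA : List (List (String × Bool)) → Option (List (String × Bool)) → List (String × Bool)
  | [], account => pvBaseA account
  | acc :: rest, account =>
    match acc.lookup "is_primary" with
    | none => []                       -- KeyError (excluded by Pre_)
    | some b => pvLoopA rest (if b then some acc else account)

def get_primary_bank_acc (bank_accounts : List (List (String × Bool))) : List (String × Bool) :=
  pvLoopA bank_accounts none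

-- ===== PORT B =====
-- B's reverse scan with early return; exhausted loop = ValueError → [] (excluded by Pre_)
def pvLoopB : List (List (String × Bool)) → List (String × Bool)
  | [] => []                           -- ValueError (excluded by Pre_)
  | acc :: rest =>
    match acc.lookup "is_primary" with
    | none => []                       -- KeyError (excluded by Pre_)
    | some b => if b then acc else pvLoopB rest

def get_primary_bank_acc_alt (bank_accounts : List (List (String × Bool))) : List (String × Bool) :=
  pvLoopB bank_accounts.reverse

-- ===== PRECONDITION & SPEC =====
-- Pre_: exactly where A returns normally — every account has the 'is_primary' key (else KeyError)
-- and at least one account is primary (else the explicit ValueError).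
def Pre_get_primary_bank_acc (bank_accounts : List (List (String × Bool))) : Prop :=
  (∀ a ∈ bank_accounts, (a.lookup "is_primary").isSome = true) ∧
  (∃ a ∈ bank_accounts, a.lookup "is_primary" = some true)
instance (bank_accounts : List (List (String × Bool))) : Decidable (Pre_get_primary_bank_acc bank_accounts) := by unfold Pre_get_primary_bank_acc; infer_instance

def pvWitness_get_primary_bank_acc : (List (List (String × Bool))) := ([[("is_primary", true)]])

def Spec_get_primary_bank_acc (bank_accounts : List (List (String × Bool))) (out : List (String × Bool)) : Prop := out = get_primary_bank_acc_alt bank_accounts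
instance (bank_accounts : List (List (String × Bool))) (out : List (String × Bool)) : Decidable (Spec_get_primary_bank_acc bank_accounts out) := by unfold Spec_get_primary_bank_acc; infer_instance

-- ===== CLAIM (what is proved, stated in full; the proofs are below) =====
def Claim_equal_get_primary_bank_acc : Prop := ∀ (bank_accounts : List (List (String × Bool))), Dom_get_primary_bank_acc bank_accounts → Pre_get_primary_bank_acc bank_accounts → Spec_get_primary_bank_acc bank_accounts (get_primary_bank_acc bank_accounts)

-- ===== LEMMAS AND PROOFS =====

-- B's scan skips a non-primary, fully-keyed prefix
lemma pvLoopB_append_no_prim (xs ys : List (List (String × Bool)))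
    (hk : ∀ a ∈ xs, (a.lookup "is_primary").isSome = true)
    (hnp : ∀ a ∈ xs, ¬ a.lookup "is_primary" = some true) :
    pvLoopB (xs ++ ys) = pvLoopB ys := by
  induction xs with
  | nil => simp
  | cons acc rest ih =>
    have hks := hk acc (by simp)
    have hnps := hnp acc (by simp)
    obtain ⟨b, hb⟩ := Option.isSome_iff_exists.mp hks
    have hbf : b = false := by
      cases b with
      | true => exact absurd hb hnps
      | false => rfl
    subst hbf
    simp only [List.cons_append, pvLoopB, hb, Bool.false_eq_true, if_false]
    exact ih (fun a ha => hk a (by simp [ha])) (fun a ha => hnp a (by simp [ha]))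

-- B's scan stops inside a prefix containing a primary account
lemma pvLoopB_append_prim (xs ys : List (List (String × Bool)))
    (hp : ∃ a ∈ xs, a.lookup "is_primary" = some true) :
    pvLoopB (xs ++ ys) = pvLoopB xs := by
  induction xs with
  | nil => simp at hp
  | cons acc rest ih =>
    simp only [List.cons_append, pvLoopB]
    cases h : acc.lookup "is_primary" with
    | none => rfl
    | some b =>
      cases b with
      | true => rfl
      | false =>
        show pvLoopB (rest ++ ys) = pvLoopB rest
        apply ih
        obtain ⟨a, ha, hat⟩ := hp
        rcases List.mem_cons.mp ha with ha | ha
        · subst ha; rw [h] at hat; simp at hat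
        · exact ⟨a, ha, hat⟩

-- main invariant: A's loop vs B's reverse scan, for any accumulator value
lemma pvLoop_main (l : List (List (String × Bool)))
    (hk : ∀ a ∈ l, (a.lookup "is_primary").isSome = true) :
    ∀ acct : Option (List (String × Bool)),
      ((∃ a ∈ l, a.lookup "is_primary" = some true) → pvLoopA l acct = pvLoopB l.reverse) ∧
      ((∀ a ∈ l, ¬ a.lookup "is_primary" = some true) → pvLoopA l acct = pvBaseA acct) := by
  induction l with
  | nil => intro acct; exact ⟨fun h => by simp at h, fun _ => rfl⟩
  | cons acc rest ih =>
    intro acct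
    have hks := hk acc (by simp)
    have hkr : ∀ a ∈ rest, (a.lookup "is_primary").isSome = true :=
      fun a ha => hk a (by simp [ha])
    have hkrr : ∀ a ∈ rest.reverse, (a.lookup "is_primary").isSome = true := by
      intro a ha; exact hkr a (List.mem_reverse.mp ha)
    obtain ⟨b, hb⟩ := Option.isSome_iff_exists.mp hks
    have hne : acc ≠ [] := by
      intro h; rw [h] at hb; simp [List.lookup] at hb
    constructor
    · intro hp
      simp only [List.reverse_cons]
      cases b with
      | true =>
        simp only [pvLoopA, hb, if_pos]
        by_cases hpr : ∃ a ∈ rest, a.lookup "is_primary" = some true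
        · rw [(ih hkr (some acc)).1 hpr,
            pvLoopB_append_prim rest.reverse [acc]
              (by obtain ⟨a, ha, hat⟩ := hpr; exact ⟨a, List.mem_reverse.mpr ha, hat⟩)]
        · push Not at hpr
          rw [(ih hkr (some acc)).2 (fun a ha hat => hpr a ha hat),
            pvLoopB_append_no_prim rest.reverse [acc] hkrr
              (fun a ha hat => hpr a (List.mem_reverse.mp ha) hat)]
          simp [pvBaseA, pvLoopB, hb, hne]
      | false =>
        have hpr : ∃ a ∈ rest, a.lookup "is_primary" = some true := by
          obtain ⟨a, ha, hat⟩ := hp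
          rcases List.mem_cons.mp ha with ha | ha
          · subst ha; rw [hb] at hat; simp at hat
          · exact ⟨a, ha, hat⟩
        simp only [pvLoopA, hb, Bool.false_eq_true, if_false]
        rw [(ih hkr acct).1 hpr,
          pvLoopB_append_prim rest.reverse [acc]
            (by obtain ⟨a, ha, hat⟩ := hpr; exact ⟨a, List.mem_reverse.mpr ha, hat⟩)]
    · intro hnp
      have hbf : b = false := by
        cases b with
        | true => exact absurd hb (hnp acc (by simp))
        | false => rfl
      subst hbf
      simp only [pvLoopA, hb, Bool.false_eq_true, if_false]
      exact (ih hkr acct).2 (fun a ha => hnp a (by simp [ha]))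

-- ===== VERDICT (by name: the statement is the Claim_ definition above) =====
theorem get_primary_bank_acc_spec : Claim_equal_get_primary_bank_acc := by
  intro l _ hpre
  obtain ⟨hk, hp⟩ := hpre
  exact (pvLoop_main l hk none).1 hp
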